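-- pv_equiv track=rewrite | github.com/Nikitaharak/ethos-device | ethos-device/rbac.py | _get_promotable_roles
-- ===== SOURCE A (Python) =====
-- ROLE_SUPER_ADMIN = "Super Admin"
--
-- ROLE_ADMIN       = "Admin"
--
-- ROLE_USER        = "User"
--
-- ROLE_HIERARCHY = [ROLE_USER, ROLE_ADMIN, ROLE_SUPER_ADMIN]
--
-- def _normalize_role(role):
--     if not role:
--         return ROLE_USER
--     r = role.strip().lower().replace(" ", "")
--     if r == "superadmin":
--         return ROLE_SUPER_ADMIN
--     if r == "admin":
--         return ROLE_ADMIN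
--     return ROLE_USER
--
-- def role_rank(role):
--     n = _normalize_role(role)
--     try:
--         return ROLE_HIERARCHY.index(n)
--     except ValueError:
--         return 0
--
-- def _get_promotable_roles(actor_role, current_target_role):
--     actor_rank_val  = role_rank(actor_role)
--     target_rank_val = role_rank(current_target_role)
--     promotable = []
--     for role in ROLE_HIERARCHY:
--         r_rank = role_rank(role)
--         if target_rank_val < r_rank < actor_rank_val:
--             promotable.append(role)
--     return promotable
-- ===== SOURCE B (Python) =====
-- ROLE_SUPER_ADMIN = "Super Admin"
-- ROLE_ADMIN       = "Admin"
-- ROLE_USER        = "User"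
-- ROLE_HIERARCHY = [ROLE_USER, ROLE_ADMIN, ROLE_SUPER_ADMIN]
--
-- def _rank(role):
--     # Rank computed directly from the normalized string, without going
--     # through role names and list.index.
--     if not role:
--         return 0
--     r = role.strip().lower().replace(" ", "")
--     if r == "superadmin":
--         return 2
--     if r == "admin":
--         return 1
--     return 0
--
-- def _get_promotable_roles(actor_role, current_target_role):
--     # Position equals rank in the sorted hierarchy, so the promotable roles
--     # are exactly the contiguous slice strictly between the two ranks.
--     return ROLE_HIERARCHY[_rank(current_target_role) + 1 : _rank(actor_role)]
-- ===== Notes on version B (the rewrite author's own statement) =====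
-- stated objective: simpler
-- what changed: Replaces A's filter loop (normalize each hierarchy role to a name, re-find its rank with list.index, test target_rank < r_rank < actor_rank) with a direct string-to-rank mapping and a closed-form slice ROLE_HIERARCHY[target_rank+1:actor_rank], exploiting that position equals rank.
import Mathlib
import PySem

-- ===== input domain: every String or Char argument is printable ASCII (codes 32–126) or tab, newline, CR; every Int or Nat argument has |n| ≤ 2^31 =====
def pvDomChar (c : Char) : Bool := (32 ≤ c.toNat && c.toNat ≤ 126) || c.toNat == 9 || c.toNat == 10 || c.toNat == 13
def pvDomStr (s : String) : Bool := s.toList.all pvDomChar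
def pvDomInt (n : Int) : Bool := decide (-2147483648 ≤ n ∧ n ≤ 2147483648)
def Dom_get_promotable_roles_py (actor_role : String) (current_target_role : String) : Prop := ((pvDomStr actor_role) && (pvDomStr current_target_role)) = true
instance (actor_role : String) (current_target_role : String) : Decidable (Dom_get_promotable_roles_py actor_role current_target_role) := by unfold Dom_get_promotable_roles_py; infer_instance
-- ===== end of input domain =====

-- B maps each role string directly to its numeric rank and returns the
-- closed-form slice ROLE_HIERARCHY[target_rank+1:actor_rank] instead of A's
-- normalize-then-index filter loop; objective: simpler.

-- ===== PORT A =====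
def pvRoleHierarchy : List String := ["User", "Admin", "Super Admin"]

def pvNormalizeRole (role : String) : String :=
  if role = "" then "User"
  else
    let r := PySem.Str.replace (PySem.Str.lower (PySem.Str.strip role)) " " ""
    if r = "superadmin" then "Super Admin"
    else if r = "admin" then "Admin"
    else "User"

def pvRoleRank (role : String) : Int :=
  match PySem.List.index? pvRoleHierarchy (pvNormalizeRole role) with
  | some i => (i : Int)
  | none => 0

def get_promotable_roles_py (actor_role : String) (current_target_role : String) : List String :=
  let actor_rank_val := pvRoleRank actor_role
  let target_rank_val := pvRoleRank current_target_role
  pvRoleHierarchy.foldl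
    (fun promotable role =>
      let r_rank := pvRoleRank role
      if target_rank_val < r_rank ∧ r_rank < actor_rank_val then promotable ++ [role]
      else promotable)
    []

-- ===== PORT B =====
def pvRank (role : String) : Int :=
  if role = "" then 0
  else
    let r := PySem.Str.replace (PySem.Str.lower (PySem.Str.strip role)) " " ""
    if r = "superadmin" then 2
    else if r = "admin" then 1
    else 0

def get_promotable_roles_py_alt (actor_role : String) (current_target_role : String) : List String :=
  PySem.List.slice pvRoleHierarchy (some (pvRank current_target_role + 1)) (some (pvRank actor_role))

-- ===== PRECONDITION & SPEC =====
def Spec_get_promotable_roles_py (actor_role : String) (current_target_role : String) (out : List String) : Prop := out = get_promotable_roles_py_alt actor_role current_target_role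
instance (actor_role : String) (current_target_role : String) (out : List String) : Decidable (Spec_get_promotable_roles_py actor_role current_target_role out) := by unfold Spec_get_promotable_roles_py; infer_instance

-- ===== CLAIM =====
def Claim_equal_get_promotable_roles_py : Prop := ∀ (actor_role : String) (current_target_role : String), Dom_get_promotable_roles_py actor_role current_target_role → Spec_get_promotable_roles_py actor_role current_target_role (get_promotable_roles_py actor_role current_target_role)

-- ===== LEMMAS AND PROOFS =====
-- A's rank agrees with B's direct rank: both branch on the same normalized string.
theorem pvRoleRank_eq_pvRank (role : String) : pvRoleRank role = pvRank role := by
  unfold pvRoleRank pvNormalizeRole pvRank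
  dsimp only
  split_ifs <;> decide

theorem pvRank_cases (r : String) : pvRank r = 0 ∨ pvRank r = 1 ∨ pvRank r = 2 := by
  unfold pvRank
  dsimp only
  split_ifs <;> simp

-- ===== VERDICT =====
theorem get_promotable_roles_py_spec : Claim_equal_get_promotable_roles_py := by
  intro a t _
  unfold Spec_get_promotable_roles_py
  simp only [get_promotable_roles_py, get_promotable_roles_py_alt, pvRoleRank_eq_pvRank]
  rcases pvRank_cases a with ha | ha | ha <;>
    rcases pvRank_cases t with ht | ht | ht <;>
      rw [ha, ht] <;> decide
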